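-- pv_equiv track=rewrite | github.com/sherzod-hakimov/negotiation-games | dond/master.py | pareto_improvement
-- ===== SOURCE A (Python) =====
-- def compute_score(counts: list[int], values: list[int]) -> int:
--     return sum(count * value for count, value in zip(counts, values))
--
-- def pareto_improvement(counts: list[int], values_a: list[int], values_b: list[int], counts_a: list[int], counts_b: list[int]) -> int:
--     # We only have very few items. So for simplicity, we simply iterate through
--     # all possible partitions. Note that not assigning an item is always worse,
--     # given that values are non-negative.
--     def all_item_subsets(counts: list[int]):
--         if len(counts) == 0:
--             yield []
--         else:
--             for i in range(counts[0] + 1):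
--                 for subset in all_item_subsets(counts[1:]):
--                     yield [i] + subset
--
--     def item_complement(total: list[int], counts: list[int]):
--         return [tot - cnt for tot, cnt in zip(total, counts)]
--
--     current_a = compute_score(counts_a, values_a)
--     current_b = compute_score(counts_b, values_b)
--     best = 0
--     for subset in all_item_subsets(counts):
--         points_a = compute_score(subset, values_a)
--         points_b = compute_score(item_complement(counts, subset), values_b)
--         if points_a >= current_a and points_b >= current_b:
--             best = max(best, max(points_a - current_a, points_b - current_b))
--     return best
-- ===== SOURCE B (Python) =====
-- def pareto_improvement(counts: list[int], values_a: list[int], values_b: list[int], counts_a: list[int], counts_b: list[int]) -> int: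
--     # Pareto-frontier dynamic programming over the items: instead of enumerating
--     # every partition, keep only the non-dominated (a-score, b-value-given-up)
--     # pairs reachable so far; a dominated pair can never beat a dominating one.
--     current_a = sum(c * v for c, v in zip(counts_a, values_a))
--     current_b = sum(c * v for c, v in zip(counts_b, values_b))
--     total_b = sum(c * v for c, v in zip(counts, values_b))
--
--     def prune(pairs):
--         # sort by a-score descending, sweep keeping strictly improving b-cost
--         kept = []
--         miny = None
--         for x, y in sorted(pairs, key=lambda p: -p[0]):
--             if miny is None or y < miny:
--                 kept.append((x, y))
--                 miny = y
--         return kept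
--
--     frontier = [(0, 0)]
--     for i, c in enumerate(counts):
--         va = values_a[i] if i < len(values_a) else 0
--         vb = values_b[i] if i < len(values_b) else 0
--         frontier = prune([(x + k * va, y + k * vb)
--                           for (x, y) in frontier for k in range(c + 1)])
--
--     best = 0
--     for x, y in frontier:
--         pb = total_b - y
--         if x >= current_a and pb >= current_b:
--             best = max(best, x - current_a, pb - current_b)
--     return best
-- ===== Notes on version B (the rewrite author's own statement) =====
-- stated objective: faster
-- what changed: A enumerates every item partition (a cartesian product of all per-item take-counts) and scores each; B runs a Pareto-frontier dynamic program over the items, keeping after each item only the non-dominated (a-score, b-value-given-up) pairs, then scans that frontier once.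
import Mathlib
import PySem

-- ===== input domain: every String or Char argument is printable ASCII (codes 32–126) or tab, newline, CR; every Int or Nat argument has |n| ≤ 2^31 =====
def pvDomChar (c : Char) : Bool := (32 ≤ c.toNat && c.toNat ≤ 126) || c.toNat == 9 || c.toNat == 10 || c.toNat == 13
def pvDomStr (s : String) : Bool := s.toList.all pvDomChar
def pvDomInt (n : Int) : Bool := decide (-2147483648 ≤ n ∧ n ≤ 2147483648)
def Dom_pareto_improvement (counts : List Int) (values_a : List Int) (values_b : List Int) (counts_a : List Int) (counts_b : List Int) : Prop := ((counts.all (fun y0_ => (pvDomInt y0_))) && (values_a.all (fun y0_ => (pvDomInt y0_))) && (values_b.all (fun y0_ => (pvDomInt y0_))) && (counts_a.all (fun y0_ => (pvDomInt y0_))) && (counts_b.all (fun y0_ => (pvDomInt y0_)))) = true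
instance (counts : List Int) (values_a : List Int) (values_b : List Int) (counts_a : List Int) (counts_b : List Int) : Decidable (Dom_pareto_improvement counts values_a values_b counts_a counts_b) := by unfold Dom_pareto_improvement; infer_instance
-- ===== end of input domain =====

-- B replaces A's enumeration of every item partition by a Pareto-frontier dynamic
-- program over the items (an alternative algorithm, measurably faster when the
-- counts leave A many partitions to enumerate).

-- ===== PORT A =====
-- compute_score(counts, values) = sum(count * value for count, value in zip(counts, values))
def pvScore (counts values : List Int) : Int :=
  (counts.zip values).foldl (fun acc p => acc + p.1 * p.2) 0

-- all_item_subsets(counts): for i in range(counts[0]+1): for subset in all_item_subsets(counts[1:]): yield [i] + subset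
def pvAllSubsets : List Int → List (List Int)
  | [] => [[]]
  | c :: rest => (PySem.List.pyRange 0 (c + 1)).flatMap (fun i => (pvAllSubsets rest).map (fun s => i :: s))

def pareto_improvement (counts : List Int) (values_a : List Int) (values_b : List Int) (counts_a : List Int) (counts_b : List Int) : Int :=
  let current_a := pvScore counts_a values_a
  let current_b := pvScore counts_b values_b
  (pvAllSubsets counts).foldl (fun best s =>
    let points_a := pvScore s values_a
    -- item_complement(counts, subset) = [tot - cnt for tot, cnt in zip(counts, subset)]
    let points_b := pvScore ((counts.zip s).map (fun p => p.1 - p.2)) values_b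
    if points_a ≥ current_a ∧ points_b ≥ current_b then
      max best (max (points_a - current_a) (points_b - current_b))
    else best) 0

-- ===== PORT B =====
-- sum(c * v for c, v in zip(xs, ys))
def pvDot (xs ys : List Int) : Int :=
  ((xs.zip ys).map (fun p => p.1 * p.2)).sum

-- prune(pairs): kept = []; miny = None; for x, y in sorted(pairs, key=lambda p: -p[0]):
--   if miny is None or y < miny: kept.append((x, y)); miny = y
def pvPrune (pairs : List (Int × Int)) : List (Int × Int) :=
  ((PySem.List.sorted pairs (fun p => -p.1)).foldl
    (fun st p => match st.2 with
      | none => (st.1 ++ [p], some p.2)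
      | some m => if p.2 < m then (st.1 ++ [p], some p.2) else st)
    ([], none)).1

-- [(x + k*va, y + k*vb) for (x, y) in frontier for k in range(c + 1)]
def pvCand (F : List (Int × Int)) (va vb c : Int) : List (Int × Int) :=
  F.flatMap (fun p => (PySem.List.pyRange 0 (c + 1)).map (fun k => (p.1 + k * va, p.2 + k * vb)))

def pareto_improvement_alt (counts : List Int) (values_a : List Int) (values_b : List Int) (counts_a : List Int) (counts_b : List Int) : Int :=
  let current_a := pvDot counts_a values_a
  let current_b := pvDot counts_b values_b
  let total_b := pvDot counts values_b
  -- for i, c in enumerate(counts): va = values_a[i] if i < len(values_a) else 0; vb likewise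
  let frontier := (counts.zipIdx).foldl (fun F ci =>
    pvPrune (pvCand F (values_a.getD ci.2 0) (values_b.getD ci.2 0) ci.1)) [(0, 0)]
  frontier.foldl (fun best p =>
    let pb := total_b - p.2
    if p.1 ≥ current_a ∧ pb ≥ current_b then
      max (max best (p.1 - current_a)) (pb - current_b)
    else best) 0

-- ===== PRECONDITION & SPEC =====
def Spec_pareto_improvement (counts : List Int) (values_a : List Int) (values_b : List Int) (counts_a : List Int) (counts_b : List Int) (out : Int) : Prop := out = pareto_improvement_alt counts values_a values_b counts_a counts_b
instance (counts : List Int) (values_a : List Int) (values_b : List Int) (counts_a : List Int) (counts_b : List Int) (out : Int) : Decidable (Spec_pareto_improvement counts values_a values_b counts_a counts_b out) := by unfold Spec_pareto_improvement; infer_instance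

-- ===== CLAIM (what is proved, stated in full; the proofs are below) =====
def Claim_equal_pareto_improvement : Prop := ∀ (counts : List Int) (values_a : List Int) (values_b : List Int) (counts_a : List Int) (counts_b : List Int), Dom_pareto_improvement counts values_a values_b counts_a counts_b → Spec_pareto_improvement counts values_a values_b counts_a counts_b (pareto_improvement counts values_a values_b counts_a counts_b)

-- ===== LEMMAS AND PROOFS =====

-- p dominates q: at least as much a-score, giving up at most as much b-value
def pvBeats (p q : Int × Int) : Prop := q.1 ≤ p.1 ∧ p.2 ≤ q.2

-- the gain a pair (a-score, b-value given up) contributes (0 if it is not a Pareto improvement)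
def pvH (ca cb T : Int) (p : Int × Int) : Int :=
  if p.1 ≥ ca ∧ T - p.2 ≥ cb then max (p.1 - ca) (T - p.2 - cb) else 0

def pvBest (ca cb T : Int) (l : List (Int × Int)) : Int :=
  l.foldl (fun b p => max b (pvH ca cb T p)) 0

-- per-item data: (count, a-value, b-value), values padded with 0 beyond the value lists
def pvTriples : List Int → List Int → List Int → List (Int × Int × Int)
  | [], _, _ => []
  | c :: cs, va, vb => (c, va.headD 0, vb.headD 0) :: pvTriples cs va.tail vb.tail

-- all reachable (a-score, b-value-taken) pairs
def pvPairs : List (Int × Int × Int) → List (Int × Int)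
  | [] => [(0, 0)]
  | t :: ts => (PySem.List.pyRange 0 (t.1 + 1)).flatMap (fun k =>
      (pvPairs ts).map (fun p => (k * t.2.1 + p.1, k * t.2.2 + p.2)))

-- B's frontier loop, and the same loop without pruning
def pvLoop : List (Int × Int × Int) → List (Int × Int) → List (Int × Int)
  | [], F => F
  | t :: ts, F => pvLoop ts (pvPrune (pvCand F t.2.1 t.2.2 t.1))

def pvLoopN : List (Int × Int × Int) → List (Int × Int) → List (Int × Int)
  | [], F => F
  | t :: ts, F => pvLoopN ts (pvCand F t.2.1 t.2.2 t.1)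

def pvCovers (F L : List (Int × Int)) : Prop :=
  (∀ p ∈ F, p ∈ L) ∧ ∀ q ∈ L, ∃ p ∈ F, pvBeats p q

lemma pvScore_eq_dot (xs ys : List Int) : pvScore xs ys = pvDot xs ys := by
  unfold pvScore pvDot
  rw [PySem.List.foldl_add (g := fun p : Int × Int => p.1 * p.2)]
  simp

lemma pvDot_cons (k : Int) (s vs : List Int) :
    pvDot (k :: s) vs = k * vs.headD 0 + pvDot s vs.tail := by
  cases vs <;> simp [pvDot]

lemma pvAllSubsets_length {counts : List Int} {s : List Int} (h : s ∈ pvAllSubsets counts) :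
    s.length = counts.length := by
  induction counts generalizing s with
  | nil => simp [pvAllSubsets] at h; simp [h]
  | cons c cs ih =>
    simp only [pvAllSubsets, List.mem_flatMap, List.mem_map] at h
    obtain ⟨k, _, s', hs', rfl⟩ := h
    simp [ih hs']

lemma pvDot_complement : ∀ (counts s vb : List Int), s.length = counts.length →
    pvDot ((counts.zip s).map (fun p => p.1 - p.2)) vb = pvDot counts vb - pvDot s vb := by
  intro counts
  induction counts with
  | nil =>
    intro s vb h
    simp [List.length_eq_zero_iff.mp h, pvDot]
  | cons c cs ih =>
    intro s vb h
    cases s with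
    | nil => simp at h
    | cons k s' =>
      simp only [List.zip_cons_cons, List.map_cons]
      rw [pvDot_cons, pvDot_cons, pvDot_cons, ih s' vb.tail (by simpa using h)]
      ring

lemma pvMapPairs : ∀ (counts va vb : List Int),
    (pvAllSubsets counts).map (fun s => (pvDot s va, pvDot s vb)) = pvPairs (pvTriples counts va vb) := by
  intro counts
  induction counts with
  | nil => intro va vb; simp [pvAllSubsets, pvTriples, pvPairs, pvDot]
  | cons c cs ih =>
    intro va vb
    simp only [pvAllSubsets, pvTriples, pvPairs, List.map_flatMap]
    refine congrArg (List.flatMap · _) (funext fun i => ?_)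
    rw [← ih va.tail vb.tail, List.map_map, List.map_map]
    refine List.map_congr_left fun s _ => ?_
    simp [Function.comp, pvDot_cons]

lemma pvH_mono {p q : Int × Int} (h : pvBeats p q) (ca cb T : Int) :
    pvH ca cb T q ≤ pvH ca cb T p := by
  obtain ⟨h1, h2⟩ := h
  unfold pvH
  split_ifs <;> omega

lemma pvBest_nonneg (ca cb T : Int) (l : List (Int × Int)) : 0 ≤ pvBest ca cb T l :=
  (PySem.List.le_foldl_max_int l (pvH ca cb T) 0).1

lemma pvH_le_pvBest (ca cb T : Int) {l : List (Int × Int)} {p : Int × Int} (h : p ∈ l) :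
    pvH ca cb T p ≤ pvBest ca cb T l :=
  (PySem.List.le_foldl_max_int l (pvH ca cb T) 0).2 p h

lemma pvFoldMax_le (ca cb T : Int) : ∀ (l : List (Int × Int)) (b M : Int),
    b ≤ M → (∀ p ∈ l, pvH ca cb T p ≤ M) →
    l.foldl (fun b p => max b (pvH ca cb T p)) b ≤ M := by
  intro l
  induction l with
  | nil => intro b M hb _; simpa using hb
  | cons p t ih =>
    intro b M hb h
    simp only [List.foldl_cons]
    exact ih _ _ (max_le hb (h p (by simp))) fun r hr => h r (by simp [hr])

lemma pvBest_le {ca cb T : Int} {l : List (Int × Int)} {M : Int}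
    (hM : 0 ≤ M) (h : ∀ p ∈ l, pvH ca cb T p ≤ M) : pvBest ca cb T l ≤ M :=
  pvFoldMax_le ca cb T l 0 M hM h

def pvSweep : Option Int → List (Int × Int) → List (Int × Int)
  | _, [] => []
  | none, p :: t => p :: pvSweep (some p.2) t
  | some m, p :: t => if p.2 < m then p :: pvSweep (some p.2) t else pvSweep (some m) t

lemma pvSweep_foldl : ∀ (t : List (Int × Int)) (acc : List (Int × Int)) (m : Option Int),
    (t.foldl (fun st p => match st.2 with
      | none => (st.1 ++ [p], some p.2)
      | some m => if p.2 < m then (st.1 ++ [p], some p.2) else st) (acc, m)).1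
    = acc ++ pvSweep m t := by
  intro t
  induction t with
  | nil => intro acc m; simp [pvSweep]
  | cons p t ih =>
    intro acc m
    cases m with
    | none =>
      simp only [List.foldl_cons]
      rw [ih]
      simp [pvSweep]
    | some μ =>
      simp only [List.foldl_cons]
      by_cases h : p.2 < μ
      · simp only [if_pos h]
        rw [ih]
        simp [pvSweep, h]
      · simp only [if_neg h]
        rw [ih]
        simp [pvSweep, h]

lemma pvPrune_eq_sweep (l : List (Int × Int)) :
    pvPrune l = pvSweep none (PySem.List.sorted l (fun p => -p.1)) := by
  unfold pvPrune
  rw [pvSweep_foldl]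
  simp

lemma pvSweep_subset : ∀ (t : List (Int × Int)) (m : Option Int), ∀ p ∈ pvSweep m t, p ∈ t := by
  intro t
  induction t with
  | nil => intro m p hp; simp [pvSweep] at hp
  | cons q t ih =>
    intro m p hp
    cases m with
    | none =>
      simp only [pvSweep, List.mem_cons] at hp
      rcases hp with h | h
      · simp [h]
      · exact List.mem_cons_of_mem _ (ih _ _ h)
    | some μ =>
      simp only [pvSweep] at hp
      split_ifs at hp with h
      · rcases List.mem_cons.1 hp with h' | h'
        · simp [h']
        · exact List.mem_cons_of_mem _ (ih _ _ h')
      · exact List.mem_cons_of_mem _ (ih _ _ hp)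

lemma pvPrune_subset {l : List (Int × Int)} {p : Int × Int} (h : p ∈ pvPrune l) : p ∈ l := by
  rw [pvPrune_eq_sweep] at h
  exact (PySem.List.mem_sorted _ _ _ _).1 (pvSweep_subset _ _ _ h)

lemma pvSweep_covers_some : ∀ (t : List (Int × Int)) (p0 : Int × Int),
    t.Pairwise (fun a b => b.1 ≤ a.1) → (∀ q ∈ t, q.1 ≤ p0.1) →
    ∀ q ∈ t, ∃ p, (p ∈ pvSweep (some p0.2) t ∨ p = p0) ∧ pvBeats p q := by
  intro t
  induction t with
  | nil => intro p0 _ _ q hq; simp at hq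
  | cons r t ih =>
    intro p0 hpw hub q hq
    by_cases h : r.2 < p0.2
    · rcases List.mem_cons.1 hq with rfl | hq'
      · exact ⟨q, Or.inl (by simp [pvSweep, h]), le_refl _, le_refl _⟩
      · obtain ⟨p, hp, hb⟩ := ih r hpw.of_cons ((List.pairwise_cons.1 hpw).1) q hq'
        rcases hp with hp | rfl
        · refine ⟨p, Or.inl ?_, hb⟩
          simp only [pvSweep, if_pos h, List.mem_cons]
          exact Or.inr hp
        · refine ⟨p, Or.inl ?_, hb⟩
          simp [pvSweep, h]
    · rcases List.mem_cons.1 hq with rfl | hq'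
      · exact ⟨p0, Or.inr rfl, hub q (by simp), by omega⟩
      · obtain ⟨p, hp, hb⟩ := ih p0 hpw.of_cons (fun q hq => hub q (List.mem_cons_of_mem _ hq)) q hq'
        rcases hp with hp | rfl
        · refine ⟨p, Or.inl ?_, hb⟩
          simpa [pvSweep, h] using hp
        · exact ⟨p, Or.inr rfl, hb⟩

lemma pvPrune_covers (l : List (Int × Int)) : ∀ q ∈ l, ∃ p ∈ pvPrune l, pvBeats p q := by
  intro q hq
  have hq' : q ∈ PySem.List.sorted l (fun p => -p.1) := (PySem.List.mem_sorted _ _ _ _).2 hq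
  have hpw : (PySem.List.sorted l (fun p : Int × Int => -p.1)).Pairwise (fun a b => b.1 ≤ a.1) :=
    (PySem.List.sorted_pairwise l (fun p : Int × Int => -p.1)).imp (fun h => by omega)
  rw [pvPrune_eq_sweep]
  cases hs : PySem.List.sorted l (fun p : Int × Int => -p.1) with
  | nil => rw [hs] at hq'; simp at hq'
  | cons r t =>
    rw [hs] at hq' hpw
    rcases List.mem_cons.1 hq' with rfl | hq''
    · exact ⟨q, by simp [pvSweep], le_refl _, le_refl _⟩
    · obtain ⟨p, hp, hb⟩ := pvSweep_covers_some t r hpw.of_cons ((List.pairwise_cons.1 hpw).1) q hq''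
      rcases hp with hp | rfl
      · exact ⟨p, by simp [pvSweep]; exact Or.inr hp, hb⟩
      · exact ⟨p, by simp [pvSweep], hb⟩

lemma pvCovers_step {F L : List (Int × Int)} (h : pvCovers F L) (va vb c : Int) :
    pvCovers (pvPrune (pvCand F va vb c)) (pvCand L va vb c) := by
  constructor
  · intro p hp
    have hp' := pvPrune_subset hp
    simp only [pvCand, List.mem_flatMap, List.mem_map] at hp' ⊢
    obtain ⟨p0, hp0, k, hk, rfl⟩ := hp'
    exact ⟨p0, h.1 p0 hp0, k, hk, rfl⟩
  · intro q hq
    simp only [pvCand, List.mem_flatMap, List.mem_map] at hq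
    obtain ⟨pL, hpL, k, hk, rfl⟩ := hq
    obtain ⟨pF, hpF, hdom⟩ := h.2 pL hpL
    have hmem : (pF.1 + k * va, pF.2 + k * vb) ∈ pvCand F va vb c := by
      simp only [pvCand, List.mem_flatMap, List.mem_map]
      exact ⟨pF, hpF, k, hk, rfl⟩
    obtain ⟨p', hp', hdom'⟩ := pvPrune_covers _ _ hmem
    refine ⟨p', hp', ?_⟩
    obtain ⟨a1, a2⟩ := hdom'
    obtain ⟨b1, b2⟩ := hdom
    constructor <;> simp at a1 a2 ⊢ <;> omega

lemma pvLoop_covers : ∀ (ts : List (Int × Int × Int)) (F L : List (Int × Int)),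
    pvCovers F L → pvCovers (pvLoop ts F) (pvLoopN ts L) := by
  intro ts
  induction ts with
  | nil => intro F L h; exact h
  | cons t ts ih => intro F L h; exact ih _ _ (pvCovers_step h _ _ _)

lemma pvLoopN_mem : ∀ (ts : List (Int × Int × Int)) (F : List (Int × Int)) (q : Int × Int),
    q ∈ pvLoopN ts F ↔ ∃ p ∈ F, ∃ r ∈ pvPairs ts, q = (p.1 + r.1, p.2 + r.2) := by
  intro ts
  induction ts with
  | nil =>
    intro F q
    simp only [pvLoopN, pvPairs, List.mem_singleton]
    constructor
    · intro h; exact ⟨q, h, (0, 0), rfl, by simp⟩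
    · rintro ⟨p, hp, r, rfl, rfl⟩; simpa using hp
  | cons t ts ih =>
    intro F q
    simp only [pvLoopN]
    rw [ih]
    constructor
    · rintro ⟨p', hp', r, hr, rfl⟩
      simp only [pvCand, List.mem_flatMap, List.mem_map] at hp'
      obtain ⟨p, hp, k, hk, rfl⟩ := hp'
      refine ⟨p, hp, (k * t.2.1 + r.1, k * t.2.2 + r.2), ?_, ?_⟩
      · simp only [pvPairs, List.mem_flatMap, List.mem_map]
        exact ⟨k, hk, r, hr, rfl⟩
      · simp only [Prod.mk.injEq]; constructor <;> ring
    · rintro ⟨p, hp, r', hr', rfl⟩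
      simp only [pvPairs, List.mem_flatMap, List.mem_map] at hr'
      obtain ⟨k, hk, r, hr, rfl⟩ := hr'
      refine ⟨(p.1 + k * t.2.1, p.2 + k * t.2.2), ?_, r, hr, ?_⟩
      · simp only [pvCand, List.mem_flatMap, List.mem_map]
        exact ⟨p, hp, k, hk, rfl⟩
      · simp; exact ⟨by ring, by ring⟩

lemma pvLoopEnum : ∀ (counts va vb : List Int) (F : List (Int × Int)),
    (counts.zipIdx).foldl (fun F ci =>
        pvPrune (pvCand F (va.getD ci.2 0) (vb.getD ci.2 0) ci.1)) F
      = pvLoop (pvTriples counts va vb) F := by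
  intro counts
  induction counts with
  | nil => intro va vb F; simp [pvTriples, pvLoop]
  | cons c cs ih =>
    intro va vb F
    rw [List.zipIdx_cons]
    simp only [List.foldl_cons]
    rw [List.zipIdx_succ, List.foldl_map]
    rw [PySem.List.foldl_congr_mem _ _
      (fun F ci => pvPrune (pvCand F (va.tail.getD ci.2 0) (vb.tail.getD ci.2 0) ci.1)) _
      (fun acc x _ => by simp)]
    rw [ih va.tail vb.tail]
    simp only [pvTriples, pvLoop]
    cases va <;> cases vb <;> rfl

lemma pvFoldIfA (ca cb T : Int) (va vb : List Int) : ∀ (l : List (List Int)) (b : Int), 0 ≤ b →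
    l.foldl (fun best s =>
        if pvDot s va ≥ ca ∧ T - pvDot s vb ≥ cb then
          max best (max (pvDot s va - ca) (T - pvDot s vb - cb))
        else best) b
      = l.foldl (fun best s => max best (pvH ca cb T (pvDot s va, pvDot s vb))) b := by
  intro l
  induction l with
  | nil => intro b _; rfl
  | cons p t ih =>
    intro b hb
    simp only [List.foldl_cons]
    unfold pvH
    split_ifs with hc
    · exact ih _ (by omega)
    · rw [max_eq_left hb]
      exact ih _ hb

lemma pvFoldIfB (ca cb T : Int) : ∀ (l : List (Int × Int)) (b : Int), 0 ≤ b →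
    l.foldl (fun best p =>
        if p.1 ≥ ca ∧ T - p.2 ≥ cb then max (max best (p.1 - ca)) (T - p.2 - cb) else best) b
      = l.foldl (fun best p => max best (pvH ca cb T p)) b := by
  intro l
  induction l with
  | nil => intro b _; rfl
  | cons p t ih =>
    intro b hb
    simp only [List.foldl_cons]
    unfold pvH
    split_ifs with hc
    · rw [max_assoc]
      exact ih _ (by omega)
    · rw [max_eq_left hb]
      exact ih _ hb

lemma pvA_eq_best (counts va vb ca cb : List Int) :
    pareto_improvement counts va vb ca cb
      = pvBest (pvDot ca va) (pvDot cb vb) (pvDot counts vb) (pvPairs (pvTriples counts va vb)) := by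
  unfold pareto_improvement
  simp only [pvScore_eq_dot]
  rw [PySem.List.foldl_congr_mem _ _
    (fun best s =>
      if pvDot s va ≥ pvDot ca va ∧ pvDot counts vb - pvDot s vb ≥ pvDot cb vb then
        max best (max (pvDot s va - pvDot ca va) (pvDot counts vb - pvDot s vb - pvDot cb vb))
      else best) _
    (fun acc s hs => by
      rw [pvDot_complement counts s vb (pvAllSubsets_length hs)])]
  rw [pvFoldIfA (pvDot ca va) (pvDot cb vb) (pvDot counts vb) va vb _ 0 le_rfl]
  unfold pvBest
  rw [← pvMapPairs counts va vb, List.foldl_map]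

lemma pvB_eq_best (counts va vb ca cb : List Int) :
    pareto_improvement_alt counts va vb ca cb
      = pvBest (pvDot ca va) (pvDot cb vb) (pvDot counts vb) (pvLoop (pvTriples counts va vb) [(0, 0)]) := by
  unfold pareto_improvement_alt
  rw [pvLoopEnum]
  rw [pvFoldIfB _ _ _ _ 0 le_rfl]
  rfl

lemma pvBest_loop_eq (ts : List (Int × Int × Int)) (ca cb T : Int) :
    pvBest ca cb T (pvLoop ts [(0, 0)]) = pvBest ca cb T (pvPairs ts) := by
  have hcov := pvLoop_covers ts [(0, 0)] [(0, 0)]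
    ⟨fun p hp => hp, fun q hq => ⟨q, hq, le_refl _, le_refl _⟩⟩
  have hmem : ∀ q, q ∈ pvLoopN ts [(0, 0)] ↔ q ∈ pvPairs ts := by
    intro q
    rw [pvLoopN_mem]
    constructor
    · rintro ⟨p, hp, r, hr, rfl⟩
      simp only [List.mem_singleton] at hp
      subst hp
      simpa using hr
    · intro h
      exact ⟨(0, 0), List.mem_singleton.2 rfl, q, h, by simp⟩
  apply le_antisymm
  · refine pvBest_le (pvBest_nonneg _ _ _ _) fun p hp => ?_
    exact pvH_le_pvBest _ _ _ ((hmem p).1 (hcov.1 p hp))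
  · refine pvBest_le (pvBest_nonneg _ _ _ _) fun q hq => ?_
    obtain ⟨p, hp, hdom⟩ := hcov.2 q ((hmem q).2 hq)
    exact le_trans (pvH_mono hdom ca cb T) (pvH_le_pvBest _ _ _ hp)

-- ===== VERDICT (by name: the statement is the Claim_ definition above) =====
theorem pareto_improvement_spec : Claim_equal_pareto_improvement := by
  intro counts va vb ca cb _
  unfold Spec_pareto_improvement
  rw [pvA_eq_best, pvB_eq_best, pvBest_loop_eq]
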